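-- pv_equiv track=rewrite | github.com/jb2170/libThresholdLogic | src/libThresholdLogic/ExampleNetworks/Multipliers.py | convolution_indices
-- ===== SOURCE A (Python) =====
-- from typing import List, Tuple
--
-- def convolution_indices(n: int) -> List[List[Tuple[int, int]]]:
--     return [
--         [
--             (u, t - u) for u in range(t + 1)
--         ]
--         for t in range(n)
--     ] + [
--         [
--             (t + u, n - 1 - u) for u in range(n - t)
--         ]
--         for t in range(1, n)
--     ]
-- ===== SOURCE B (Python) =====
-- def convolution_indices(n):
--     diags = {s: [] for s in range(2 * n - 1)}
--     for i in range(n):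
--         for j in range(n):
--             diags[i + j].append((i, j))
--     return [diags[s] for s in range(2 * n - 1)]
-- ===== Notes on version B (the rewrite author's own statement) =====
-- stated objective: alternative
-- what changed: Replaces A's two concatenated diagonal comprehensions with closed-form index arithmetic by a hash-grouping algorithm: a single pass over all grid cells (i,j) appending each to a dict bucket keyed by i+j, then reading the buckets out in key order.
import Mathlib
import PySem

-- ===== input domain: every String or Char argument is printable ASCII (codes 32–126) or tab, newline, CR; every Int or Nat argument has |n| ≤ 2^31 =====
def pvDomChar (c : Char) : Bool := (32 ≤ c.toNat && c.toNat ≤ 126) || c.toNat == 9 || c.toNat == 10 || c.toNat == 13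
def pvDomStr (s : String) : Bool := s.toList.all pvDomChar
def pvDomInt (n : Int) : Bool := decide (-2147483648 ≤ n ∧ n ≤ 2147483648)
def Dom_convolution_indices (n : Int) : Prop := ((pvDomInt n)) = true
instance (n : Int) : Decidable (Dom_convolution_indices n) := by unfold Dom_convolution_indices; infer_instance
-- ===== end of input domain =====

-- B replaces A's two concatenated diagonal comprehensions by dict-bucket grouping: one pass over all grid cells appending (i,j) to bucket i+j, then reading buckets in key order (alternative algorithm, same cost).


-- ===== PORT A =====
def convolution_indices (n : Int) : List (List (Int × Int)) :=
  ((PySem.List.pyRange 0 n 1).map (fun t =>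
      (PySem.List.pyRange 0 (t + 1) 1).map (fun u => (u, t - u))))
  ++ ((PySem.List.pyRange 1 n 1).map (fun t =>
      (PySem.List.pyRange 0 (n - t) 1).map (fun u => (t + u, n - 1 - u))))

-- ===== PORT B =====
-- diags[i + j].append((i, j)) mutates the bucket in place = Dict.modify (i+j) [] (· ++ [(i, j)]);
-- every key read (diags[i+j] and the final diags[s]) is present by construction (0 ≤ i+j ≤ 2n-2),
-- so the total forms modify/getD with default [] are exact here (no KeyError occurs).
def convolution_indices_alt (n : Int) : List (List (Int × Int)) :=
  let init : PySem.Dict Int (List (Int × Int)) :=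
    (PySem.List.pyRange 0 (2 * n - 1) 1).foldl (fun d s => d.insert s []) PySem.Dict.empty
  let diags : PySem.Dict Int (List (Int × Int)) :=
    (PySem.List.pyRange 0 n 1).foldl (fun d i =>
      (PySem.List.pyRange 0 n 1).foldl (fun d j =>
        d.modify (i + j) [] (fun l => l ++ [(i, j)])) d) init
  (PySem.List.pyRange 0 (2 * n - 1) 1).map (fun s => diags.getD s [])

-- ===== PRECONDITION & SPEC =====
def Spec_convolution_indices (n : Int) (out : List (List (Int × Int))) : Prop := out = convolution_indices_alt n
instance (n : Int) (out : List (List (Int × Int))) : Decidable (Spec_convolution_indices n out) := by unfold Spec_convolution_indices; infer_instance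

-- ===== CLAIM (what is proved, stated in full; the proofs are below) =====
def Claim_equal_convolution_indices : Prop := ∀ (n : Int), Dom_convolution_indices n → Spec_convolution_indices n (convolution_indices n)

-- ===== LEMMAS AND PROOFS =====

-- shift lemma: range(a, b) = [a + k for k in range(0, b - a)]
lemma pyRange_shift (a b : Int) :
    PySem.List.pyRange a b 1 = (PySem.List.pyRange 0 (b - a) 1).map (fun k => a + k) := by
  rw [PySem.List.pyRange_one, PySem.List.pyRange_one, List.map_map]
  simp

-- filtering a range by equality with s keeps exactly s when it is in the range
lemma filter_pyRange_beq (a b s : Int) :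
    (PySem.List.pyRange a b 1).filter (fun j => j == s)
      = if a ≤ s ∧ s < b then [s] else [] := by
  rw [List.filter_beq]
  by_cases h : a ≤ s ∧ s < b
  · rw [if_pos h,
      List.count_eq_one_of_mem (PySem.List.nodup_pyRange_one _ _) ((PySem.List.mem_pyRange_one).2 h)]
    rfl
  · rw [if_neg h, List.count_eq_zero.2 (fun hm => h ((PySem.List.mem_pyRange_one).1 hm)),
      List.replicate_zero]

-- every bucket of the pre-seeded dict {s: [] for s in range(m)} is []
lemma getD_seed (L : List Int) (d : PySem.Dict Int (List (Int × Int))) (s : Int)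
    (h : ∀ k, d.getD k [] = []) :
    (L.foldl (fun d x => d.insert x []) d).getD s [] = [] := by
  induction L generalizing d with
  | nil => exact h s
  | cons x L ih =>
    refine ih _ (fun k => ?_)
    rw [PySem.Dict.getD_insert]
    split <;> [rfl; exact h k]

-- bucket s of the grouping fold, in closed form: the cells (i, s - i) of row i that land on diagonal s
lemma bucket_closed_form (n s : Int) (init : PySem.Dict Int (List (Int × Int)))
    (hinit : init.getD s [] = []) :
    ((PySem.List.pyRange 0 n 1).foldl (fun d i =>
        (PySem.List.pyRange 0 n 1).foldl (fun d j =>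
          d.modify (i + j) [] (fun l => l ++ [(i, j)])) d) init).getD s []
      = (PySem.List.pyRange 0 n 1).flatMap
          (fun i => if 0 ≤ s - i ∧ s - i < n then [(i, s - i)] else []) := by
  have hinner : ∀ (d : PySem.Dict Int (List (Int × Int))) (i : Int),
      (PySem.List.pyRange 0 n 1).foldl (fun d j =>
          d.modify (i + j) [] (fun l => l ++ [(i, j)])) d
        = ((PySem.List.pyRange 0 n 1).map (fun j => ((i + j), (i, j)))).foldl
            (fun d p => d.modify p.1 [] (fun l => l ++ [p.2])) d := by
    intro d i; rw [List.foldl_map]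
  calc ((PySem.List.pyRange 0 n 1).foldl (fun d i =>
        (PySem.List.pyRange 0 n 1).foldl (fun d j =>
          d.modify (i + j) [] (fun l => l ++ [(i, j)])) d) init).getD s []
      = (((PySem.List.pyRange 0 n 1).flatMap
            (fun i => (PySem.List.pyRange 0 n 1).map (fun j => ((i + j), (i, j))))).foldl
            (fun d p => d.modify p.1 [] (fun l => l ++ [p.2])) init).getD s [] := by
        rw [List.foldl_flatMap]
        congr 1
        exact PySem.List.foldl_congr_mem _ _ _ _ (fun d i _ => hinner d i)
    _ = (PySem.List.pyRange 0 n 1).flatMap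
          (fun i => if 0 ≤ s - i ∧ s - i < n then [(i, s - i)] else []) := by
        rw [PySem.Dict.getD_foldl_modify_append, hinit, List.nil_append,
          List.filter_flatMap, List.map_flatMap]
        apply List.flatMap_congr
        intro i _
        rw [List.filter_map]
        have hp : ∀ j ∈ PySem.List.pyRange 0 n 1,
            ((fun (p : Int × (Int × Int)) => p.1 == s) ∘ fun j => ((i + j), (i, j))) j
              = (fun j => j == s - i) j := by
          intro j _
          by_cases hj : i + j = s <;> simp [Function.comp, hj] <;> omega
        rw [List.filter_congr hp, filter_pyRange_beq]
        by_cases hc : 0 ≤ s - i ∧ s - i < n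
        · rw [if_pos hc, if_pos ⟨by omega, by omega⟩]
          simp
        · rw [if_neg (by omega), if_neg hc]
          simp

-- diagonal s < n: the bucket is A's first-half row s
lemma bucket_first (n s : Int) (h0 : 0 ≤ s) (h1 : s < n) :
    (PySem.List.pyRange 0 n 1).flatMap
        (fun i => if 0 ≤ s - i ∧ s - i < n then [(i, s - i)] else [])
      = (PySem.List.pyRange 0 (s + 1) 1).map (fun u => (u, s - u)) := by
  rw [PySem.List.pyRange_one_append 0 (s + 1) n (by omega) (by omega), List.flatMap_append]
  have h2 : (PySem.List.pyRange 0 (s + 1) 1).flatMap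
      (fun i => if 0 ≤ s - i ∧ s - i < n then [(i, s - i)] else [])
      = (PySem.List.pyRange 0 (s + 1) 1).flatMap (fun i => [(i, s - i)]) := by
    apply List.flatMap_congr
    intro i hi
    have := (PySem.List.mem_pyRange_one).1 hi
    rw [if_pos ⟨by omega, by omega⟩]
  have h3 : (PySem.List.pyRange (s + 1) n 1).flatMap
      (fun i => if 0 ≤ s - i ∧ s - i < n then [(i, s - i)] else []) = [] := by
    rw [List.flatMap_congr (g := fun _ => []) (fun i hi => by
      have := (PySem.List.mem_pyRange_one).1 hi
      rw [if_neg (by omega)])]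
    simp
  rw [h2, h3, ← List.map_eq_flatMap, List.append_nil]

-- diagonal s = t + n - 1 with 1 ≤ t < n: the bucket is A's second-half row t
lemma bucket_second (n t : Int) (h1 : 1 ≤ t) (h2 : t < n) :
    (PySem.List.pyRange 0 n 1).flatMap
        (fun i => if 0 ≤ (t + (n - 1)) - i ∧ (t + (n - 1)) - i < n then [(i, (t + (n - 1)) - i)] else [])
      = (PySem.List.pyRange 0 (n - t) 1).map (fun u => (t + u, n - 1 - u)) := by
  rw [PySem.List.pyRange_one_append 0 t n (by omega) (by omega), List.flatMap_append]
  have h3 : (PySem.List.pyRange 0 t 1).flatMap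
      (fun i => if 0 ≤ (t + (n - 1)) - i ∧ (t + (n - 1)) - i < n then [(i, (t + (n - 1)) - i)] else []) = [] := by
    rw [List.flatMap_congr (g := fun _ => []) (fun i hi => by
      have := (PySem.List.mem_pyRange_one).1 hi
      rw [if_neg (by omega)])]
    simp
  have h4 : (PySem.List.pyRange t n 1).flatMap
      (fun i => if 0 ≤ (t + (n - 1)) - i ∧ (t + (n - 1)) - i < n then [(i, (t + (n - 1)) - i)] else [])
      = (PySem.List.pyRange t n 1).map (fun i => (i, (t + (n - 1)) - i)) := by
    rw [List.flatMap_congr (g := fun i => [(i, (t + (n - 1)) - i)]) (fun i hi => by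
      have := (PySem.List.mem_pyRange_one).1 hi
      rw [if_pos ⟨by omega, by omega⟩]), ← List.map_eq_flatMap]
  rw [h3, h4, List.nil_append, pyRange_shift t n, List.map_map]
  have : n - t - 0 = n - t := by omega
  apply List.map_congr_left
  intro u hu
  have := (PySem.List.mem_pyRange_one).1 hu
  simp only [Function.comp]
  refine Prod.ext rfl ?_
  omega

-- ===== VERDICT (by name: the statement is the Claim_ definition above) =====
theorem convolution_indices_spec : Claim_equal_convolution_indices := by
  intro n _
  unfold Spec_convolution_indices convolution_indices convolution_indices_alt
  by_cases h : n ≤ 0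
  · rw [PySem.List.pyRange_one_eq_nil (by omega : n ≤ 0),
        PySem.List.pyRange_one_eq_nil (by omega : n ≤ (1:Int)),
        PySem.List.pyRange_one_eq_nil (by omega : 2 * n - 1 ≤ 0)]
    simp
  · push Not at h
    rw [PySem.List.pyRange_one_append 0 n (2 * n - 1) (by omega) (by omega), List.map_append]
    congr 1
    · apply List.map_congr_left
      intro s hs
      have hm := (PySem.List.mem_pyRange_one).1 hs
      rw [bucket_closed_form n s _ (getD_seed _ _ _ (fun k => PySem.Dict.getD_empty k [])), bucket_first n s hm.1 hm.2]
    · have hsh : PySem.List.pyRange n (2 * n - 1) 1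
          = (PySem.List.pyRange 1 n 1).map (fun t => t + (n - 1)) := by
        rw [pyRange_shift n (2 * n - 1), pyRange_shift 1 n, List.map_map]
        have : 2 * n - 1 - n = n - 1 := by omega
        rw [this]
        apply List.map_congr_left
        intro k _
        simp only [Function.comp]
        omega
      rw [hsh, List.map_map]
      apply List.map_congr_left
      intro t ht
      have hm := (PySem.List.mem_pyRange_one).1 ht
      simp only [Function.comp]
      rw [bucket_closed_form n _ _ (getD_seed _ _ _ (fun k => PySem.Dict.getD_empty k [])), bucket_second n t hm.1 hm.2]
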